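-- pv_equiv track=rewrite | github.com/JasonBBelcher/ai-stack | src/cascade/prompt_adjuster.py | _restructure_prompt
-- ===== SOURCE A (Python) =====
-- def _restructure_prompt(prompt: str) -> str:
--     """Restructure a prompt for better flow."""
--     # Split into sections
--     lines = prompt.split('\n')
--
--     # Identify sections
--     sections = {
--         'task': [],
--         'context': [],
--         'instructions': []
--     }
--
--     current_section = 'task'
--     for line in lines:
--         line_lower = line.lower()
--         if 'task:' in line_lower or 'description:' in line_lower:
--             current_section = 'task'
--         elif 'context:' in line_lower or 'background:' in line_lower:
--             current_section = 'context'
--         elif 'instruction' in line_lower or 'requirement' in line_lower: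
--             current_section = 'instructions'
--
--         sections[current_section].append(line)
--
--     # Rebuild with clear structure
--     restructured = "Task:\n" + "\n".join(sections['task']) + "\n\n"
--     if sections['context']:
--         restructured += "Context:\n" + "\n".join(sections['context']) + "\n\n"
--     if sections['instructions']:
--         restructured += "Instructions:\n" + "\n".join(sections['instructions'])
--
--     return restructured
-- ===== SOURCE B (Python) =====
-- def _classify(section: str, line: str) -> str:
--     ll = line.lower()
--     if 'task:' in ll or 'description:' in ll:
--         return 'task'
--     if 'context:' in ll or 'background:' in ll:
--         return 'context'
--     if 'instruction' in ll or 'requirement' in ll: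
--         return 'instructions'
--     return section
--
--
-- def _restructure_prompt(prompt: str) -> str:
--     """Classify each line with its section label in one scan, then group by filtering."""
--     labeled = []
--     section = 'task'
--     for line in prompt.split('\n'):
--         section = _classify(section, line)
--         labeled.append((section, line))
--
--     task = [l for s, l in labeled if s == 'task']
--     context = [l for s, l in labeled if s == 'context']
--     instructions = [l for s, l in labeled if s == 'instructions']
--
--     out = "Task:\n" + "\n".join(task) + "\n\n"
--     if context:
--         out += "Context:\n" + "\n".join(context) + "\n\n"
--     if instructions:
--         out += "Instructions:\n" + "\n".join(instructions)
--     return out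
-- ===== Notes on version B (the rewrite author's own statement) =====
-- stated objective: alternative
-- what changed: Replaces A's single interleaved loop that appends into a dict of section lists with a classify-then-group shape: one scan labels every line with its section, then three filter comprehensions build the buckets before assembly.
import Mathlib
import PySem

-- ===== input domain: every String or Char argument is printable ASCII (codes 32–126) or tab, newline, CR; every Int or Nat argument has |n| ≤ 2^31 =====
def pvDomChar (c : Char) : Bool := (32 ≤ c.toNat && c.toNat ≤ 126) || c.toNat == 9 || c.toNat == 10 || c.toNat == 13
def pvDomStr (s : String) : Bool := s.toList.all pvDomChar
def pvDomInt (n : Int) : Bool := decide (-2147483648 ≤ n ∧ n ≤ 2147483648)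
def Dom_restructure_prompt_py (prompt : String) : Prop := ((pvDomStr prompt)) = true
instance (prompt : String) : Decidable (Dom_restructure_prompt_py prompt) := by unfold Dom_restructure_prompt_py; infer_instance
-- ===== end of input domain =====

-- B replaces A's interleaved loop (dict of section lists built while classifying) with a classify-then-group decomposition: one scan labels each line, three filters build the buckets, same assembly (objective: alternative, same cost).


-- ===== PORT A =====
-- Port of A: interleaved loop appending into a dict of section lists.
def pvStepA (st : PySem.Dict String (List String) × String) (line : String) :
    PySem.Dict String (List String) × String :=
  let line_lower := PySem.Str.lower line
  let cs :=
    if PySem.Str.isIn "task:" line_lower || PySem.Str.isIn "description:" line_lower then "task"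
    else if PySem.Str.isIn "context:" line_lower || PySem.Str.isIn "background:" line_lower then "context"
    else if PySem.Str.isIn "instruction" line_lower || PySem.Str.isIn "requirement" line_lower then "instructions"
    else st.2
  (st.1.modify cs [] (fun xs => xs ++ [line]), cs)

def restructure_prompt_py (prompt : String) : String :=
  -- prompt.split('\n'): sep is the non-empty literal "\n", so split? is always some
  let lines : List String := (PySem.Str.split? prompt "\n").getD []
  let sections : PySem.Dict String (List String) :=
    ((PySem.Dict.empty.insert "task" []).insert "context" []).insert "instructions" []
  let sections := (lines.foldl pvStepA (sections, "task")).1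
  let restructured := "Task:\n" ++ PySem.Str.join "\n" (sections.getD "task" []) ++ "\n\n"
  let restructured :=
    if sections.getD "context" [] = [] then restructured
    else restructured ++ "Context:\n" ++ PySem.Str.join "\n" (sections.getD "context" []) ++ "\n\n"
  let restructured :=
    if sections.getD "instructions" [] = [] then restructured
    else restructured ++ "Instructions:\n" ++ PySem.Str.join "\n" (sections.getD "instructions" [])
  restructured

-- ===== PORT B =====
-- Port of B: label every line in one scan, then build the three buckets by filtering.
def pvClassify (sec line : String) : String :=
  let ll := PySem.Str.lower line
  if PySem.Str.isIn "task:" ll || PySem.Str.isIn "description:" ll then "task"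
  else if PySem.Str.isIn "context:" ll || PySem.Str.isIn "background:" ll then "context"
  else if PySem.Str.isIn "instruction" ll || PySem.Str.isIn "requirement" ll then "instructions"
  else sec

def pvLabelLines (sec : String) : List String → List (String × String)
  | [] => []
  | l :: ls =>
    let s := pvClassify sec l
    (s, l) :: pvLabelLines s ls

def restructure_prompt_py_alt (prompt : String) : String :=
  let labeled := pvLabelLines "task" ((PySem.Str.split? prompt "\n").getD [])
  let task := (labeled.filter (fun p => p.1 == "task")).map (fun p => p.2)
  let context := (labeled.filter (fun p => p.1 == "context")).map (fun p => p.2)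
  let instructions := (labeled.filter (fun p => p.1 == "instructions")).map (fun p => p.2)
  let out := "Task:\n" ++ PySem.Str.join "\n" task ++ "\n\n"
  let out := if context = [] then out else out ++ "Context:\n" ++ PySem.Str.join "\n" context ++ "\n\n"
  let out := if instructions = [] then out else out ++ "Instructions:\n" ++ PySem.Str.join "\n" instructions
  out

-- ===== PRECONDITION & SPEC =====
def Spec_restructure_prompt_py (prompt : String) (out : String) : Prop := out = restructure_prompt_py_alt prompt
instance (prompt : String) (out : String) : Decidable (Spec_restructure_prompt_py prompt out) := by unfold Spec_restructure_prompt_py; infer_instance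

-- ===== CLAIM (what is proved, stated in full; the proofs are below) =====
def Claim_equal_restructure_prompt_py : Prop := ∀ (prompt : String), Dom_restructure_prompt_py prompt → Spec_restructure_prompt_py prompt (restructure_prompt_py prompt)

-- ===== LEMMAS AND PROOFS =====

-- A's dict bucket for any key equals the prior contents followed by B's filtered bucket.
lemma pvBucket (lines : List String) : ∀ (sec : String) (d : PySem.Dict String (List String)) (k : String),
    ((lines.foldl pvStepA (d, sec)).1).getD k [] =
      d.getD k [] ++ ((pvLabelLines sec lines).filter (fun p => p.1 == k)).map (fun p => p.2) := by
  induction lines with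
  | nil => intro sec d k; simp [pvLabelLines]
  | cons l ls ih =>
    intro sec d k
    have hstep : pvStepA (d, sec) l
        = (d.modify (pvClassify sec l) [] (fun xs => xs ++ [l]), pvClassify sec l) := rfl
    rw [List.foldl_cons, hstep, ih]
    by_cases hk : pvClassify sec l = k
    · subst hk
      simp [pvLabelLines, PySem.Dict.getD_modify_self]
    · rw [PySem.Dict.getD_modify_of_ne _ _ _ (Ne.symm hk)]
      simp [pvLabelLines, hk]

-- ===== VERDICT (by name: the statement is the Claim_ definition above) =====
theorem restructure_prompt_py_spec : Claim_equal_restructure_prompt_py := by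
  intro prompt _
  unfold Spec_restructure_prompt_py restructure_prompt_py restructure_prompt_py_alt
  simp only [pvBucket]
  rfl
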